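-- pv_equiv track=rewrite | github.com/jimmc414/myers_briggs_test | core/scoring.py | get_compatibility_insights
-- ===== SOURCE A (Python) =====
-- from typing import Dict, List, Tuple, Optional
--
-- def get_compatibility_insights(mbti_type: str) -> Dict:
--     """Get compatibility insights with other types."""
--     # Simplified compatibility model
--     compatibilities = {
--         'highly_compatible': [],
--         'compatible': [],
--         'challenging': []
--     }
--
--     # This is a simplified model - real compatibility is more complex
--     type_groups = {
--         'analysts': ['INTJ', 'INTP', 'ENTJ', 'ENTP'],
--         'diplomats': ['INFJ', 'INFP', 'ENFJ', 'ENFP'],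
--         'sentinels': ['ISTJ', 'ISFJ', 'ESTJ', 'ESFJ'],
--         'explorers': ['ISTP', 'ISFP', 'ESTP', 'ESFP']
--     }
--
--     # Find which group this type belongs to
--     my_group = None
--     for group, types in type_groups.items():
--         if mbti_type in types:
--             my_group = group
--             break
--
--     if my_group:
--         # Same group = generally compatible
--         compatibilities['compatible'] = [t for t in type_groups[my_group] if t != mbti_type]
--
--     return compatibilities
-- ===== SOURCE B (Python) =====
-- # Inverted index built once: each MBTI type -> its same-group peers (group order preserved).
-- _PEERS = {t: [u for u in types if u != t]
--           for types in (['INTJ', 'INTP', 'ENTJ', 'ENTP'],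
--                         ['INFJ', 'INFP', 'ENFJ', 'ENFP'],
--                         ['ISTJ', 'ISFJ', 'ESTJ', 'ESFJ'],
--                         ['ISTP', 'ISFP', 'ESTP', 'ESFP'])
--           for t in types}
--
-- def get_compatibility_insights(mbti_type: str) -> dict:
--     """Get compatibility insights with other types."""
--     return {
--         'highly_compatible': [],
--         'compatible': _PEERS.get(mbti_type, []),
--         'challenging': [],
--     }
-- ===== Notes on version B (the rewrite author's own statement) =====
-- stated objective: simpler
-- what changed: Replaced the per-call group-scanning loop and conditional dict mutation with a module-level inverted index mapping each MBTI type directly to its same-group peers; the function body is a single dict lookup.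
import Mathlib
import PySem

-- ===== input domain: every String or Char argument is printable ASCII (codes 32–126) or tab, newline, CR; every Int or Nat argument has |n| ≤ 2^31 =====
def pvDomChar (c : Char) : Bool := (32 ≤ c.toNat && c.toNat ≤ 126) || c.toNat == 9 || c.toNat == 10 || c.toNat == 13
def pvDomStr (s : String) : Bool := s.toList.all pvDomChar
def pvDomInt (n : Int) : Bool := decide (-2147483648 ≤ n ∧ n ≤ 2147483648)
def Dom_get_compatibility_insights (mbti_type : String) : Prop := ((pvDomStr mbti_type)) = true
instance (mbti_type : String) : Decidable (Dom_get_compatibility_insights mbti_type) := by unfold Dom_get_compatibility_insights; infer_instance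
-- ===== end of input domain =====

-- B replaces A's per-call group-scanning loop with an inverted index (type -> same-group peers) built once; the body is one lookup.

-- ===== PORT A =====
-- type_groups, in insertion order
def pvTypeGroupsA : List (String × List String) :=
  [("analysts", ["INTJ", "INTP", "ENTJ", "ENTP"]),
   ("diplomats", ["INFJ", "INFP", "ENFJ", "ENFP"]),
   ("sentinels", ["ISTJ", "ISFJ", "ESTJ", "ESFJ"]),
   ("explorers", ["ISTP", "ISFP", "ESTP", "ESFP"])]

-- the 'for group, types … if mbti_type in types: my_group = group; break' loop
def pvFindGroupA (mbti_type : String) : List (String × List String) → Option String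
  | [] => none
  | (group, types) :: rest =>
      if mbti_type ∈ types then some group else pvFindGroupA mbti_type rest

def get_compatibility_insights (mbti_type : String) : List (String × List String) :=
  let compatibilities : PySem.Dict String (List String) :=
    PySem.Dict.ofList [("highly_compatible", []), ("compatible", []), ("challenging", [])]
  let my_group := pvFindGroupA mbti_type pvTypeGroupsA
  (match my_group with
   | some g =>
       -- compatibilities['compatible'] = [t for t in type_groups[my_group] if t != mbti_type]
       compatibilities.insert "compatible"
         (((PySem.Dict.ofList pvTypeGroupsA).getD g []).filter (fun t => t ≠ mbti_type))
   | none => compatibilities).items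

-- ===== PORT B =====
-- _PEERS: the dict comprehension over the four group lists
def pvPeers : PySem.Dict String (List String) :=
  PySem.Dict.ofList
    (([["INTJ", "INTP", "ENTJ", "ENTP"],
       ["INFJ", "INFP", "ENFJ", "ENFP"],
       ["ISTJ", "ISFJ", "ESTJ", "ESFJ"],
       ["ISTP", "ISFP", "ESTP", "ESFP"]] : List (List String)).flatMap
      (fun types => types.map (fun t => (t, types.filter (fun u => u ≠ t)))))

def get_compatibility_insights_alt (mbti_type : String) : List (String × List String) :=
  [("highly_compatible", []),
   ("compatible", pvPeers.getD mbti_type []),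
   ("challenging", [])]

-- ===== PRECONDITION & SPEC =====
def Spec_get_compatibility_insights (mbti_type : String) (out : List (String × List String)) : Prop := out = get_compatibility_insights_alt mbti_type
instance (mbti_type : String) (out : List (String × List String)) : Decidable (Spec_get_compatibility_insights mbti_type out) := by unfold Spec_get_compatibility_insights; infer_instance

-- ===== CLAIM (what is proved, stated in full; the proofs are below) =====
def Claim_equal_get_compatibility_insights : Prop := ∀ (mbti_type : String), Dom_get_compatibility_insights mbti_type → Spec_get_compatibility_insights mbti_type (get_compatibility_insights mbti_type)

-- ===== LEMMAS AND PROOFS =====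
def pvAllTypes : List String :=
  ["INTJ", "INTP", "ENTJ", "ENTP", "INFJ", "INFP", "ENFJ", "ENFP",
   "ISTJ", "ISFJ", "ESTJ", "ESFJ", "ISTP", "ISFP", "ESTP", "ESFP"]

-- ===== VERDICT (by name: the statement is the Claim_ definition above) =====
theorem get_compatibility_insights_spec : Claim_equal_get_compatibility_insights := by
  intro s _
  show get_compatibility_insights s = get_compatibility_insights_alt s
  by_cases h : s ∈ pvAllTypes
  · simp only [pvAllTypes, List.mem_cons, List.not_mem_nil, or_false] at h
    rcases h with rfl | rfl | rfl | rfl | rfl | rfl | rfl | rfl | rfl | rfl | rfl | rfl | rfl | rfl | rfl | rfl <;> decide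
  · simp only [pvAllTypes, List.mem_cons, List.not_mem_nil, or_false, not_or] at h
    obtain ⟨h1, h2, h3, h4, h5, h6, h7, h8, h9, h10, h11, h12, h13, h14, h15, h16⟩ := h
    have e1 : ("INTJ" == s) = false := by simp [Ne.symm h1]
    have e2 : ("INTP" == s) = false := by simp [Ne.symm h2]
    have e3 : ("ENTJ" == s) = false := by simp [Ne.symm h3]
    have e4 : ("ENTP" == s) = false := by simp [Ne.symm h4]
    have e5 : ("INFJ" == s) = false := by simp [Ne.symm h5]
    have e6 : ("INFP" == s) = false := by simp [Ne.symm h6]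
    have e7 : ("ENFJ" == s) = false := by simp [Ne.symm h7]
    have e8 : ("ENFP" == s) = false := by simp [Ne.symm h8]
    have e9 : ("ISTJ" == s) = false := by simp [Ne.symm h9]
    have e10 : ("ISFJ" == s) = false := by simp [Ne.symm h10]
    have e11 : ("ESTJ" == s) = false := by simp [Ne.symm h11]
    have e12 : ("ESFJ" == s) = false := by simp [Ne.symm h12]
    have e13 : ("ISTP" == s) = false := by simp [Ne.symm h13]
    have e14 : ("ISFP" == s) = false := by simp [Ne.symm h14]
    have e15 : ("ESTP" == s) = false := by simp [Ne.symm h15]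
    have e16 : ("ESFP" == s) = false := by simp [Ne.symm h16]
    simp [get_compatibility_insights, get_compatibility_insights_alt, pvFindGroupA,
      pvTypeGroupsA, pvPeers, PySem.Dict.getD, PySem.Dict.get?,
      PySem.Dict.ofList, PySem.Dict.update, PySem.Dict.insert,
      PySem.Dict.empty, List.find?,
      h1, h2, h3, h4, h5, h6, h7, h8, h9, h10, h11, h12, h13, h14, h15, h16,
      e1, e2, e3, e4, e5, e6, e7, e8, e9, e10, e11, e12, e13, e14, e15, e16]
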